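-- pv_equiv track=rewrite | github.com/ZARUJU/shingikai-pipeline | src/shingikai/quality.py | _has_strict_round_reset
-- ===== SOURCE A (Python) =====
-- def _has_strict_round_reset(meetings: list[dict[str, object]]) -> bool:
--     numbered_meetings = [meeting for meeting in meetings if meeting.get("round_label") is not None]
--     if len(numbered_meetings) < 2:
--         return False
--
--     previous_round: int | None = None
--     for meeting in numbered_meetings:
--         round_label = int(meeting["round_label"])
--         if previous_round is not None and round_label < previous_round:
--             return True
--         previous_round = round_label
--
--     return False
-- ===== SOURCE B (Python) =====
-- def _has_strict_round_reset(meetings: list[dict[str, object]]) -> bool: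
--     rounds = [int(m["round_label"]) for m in meetings if m.get("round_label") is not None]
--     return rounds != sorted(rounds)
-- ===== Notes on version B (the rewrite author's own statement) =====
-- stated objective: simpler
-- what changed: Replaces the length guard plus explicit previous-value accumulator loop with building the round list once and comparing it to its sorted copy (a decrease exists iff the sequence is not non-decreasing).
import Mathlib
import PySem

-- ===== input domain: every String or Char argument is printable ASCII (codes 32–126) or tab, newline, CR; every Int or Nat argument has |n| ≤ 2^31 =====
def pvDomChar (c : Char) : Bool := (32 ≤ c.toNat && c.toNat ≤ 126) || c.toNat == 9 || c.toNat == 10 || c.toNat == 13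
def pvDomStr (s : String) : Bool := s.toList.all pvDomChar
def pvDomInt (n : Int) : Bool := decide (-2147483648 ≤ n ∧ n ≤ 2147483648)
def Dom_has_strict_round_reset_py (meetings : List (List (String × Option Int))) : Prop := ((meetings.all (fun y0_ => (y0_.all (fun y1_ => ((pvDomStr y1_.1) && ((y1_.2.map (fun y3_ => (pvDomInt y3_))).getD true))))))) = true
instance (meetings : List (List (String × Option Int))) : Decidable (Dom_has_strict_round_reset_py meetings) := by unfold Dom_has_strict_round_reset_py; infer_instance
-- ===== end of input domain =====

-- B replaces A's accumulator scan with "round list ≠ its sorted copy" (objective: simpler).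

-- ===== PORT A =====
-- meeting.get("round_label") on the association list (first match, default None)
def pvGetRound (m : List (String × Option Int)) : Option Int :=
  (PySem.Dict.mk m).getD "round_label" none

-- the for-loop of A with state previous_round; early 'return True' is the true branch
def pvALoop (prev : Option Int) : List (List (String × Option Int)) → Bool
  | [] => false
  | m :: rest =>
    -- int(meeting["round_label"]); the key is present on every element of the filtered list,
    -- so the .getD 0 default is never used
    let round_label := (pvGetRound m).getD 0
    match prev with
    | some p => if round_label < p then true else pvALoop (some round_label) rest
    | none => pvALoop (some round_label) rest

def has_strict_round_reset_py (meetings : List (List (String × Option Int))) : Bool :=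
  let numbered := meetings.filter (fun m => (pvGetRound m).isSome)
  if numbered.length < 2 then false
  else pvALoop none numbered

-- ===== PORT B =====
def has_strict_round_reset_py_alt (meetings : List (List (String × Option Int))) : Bool :=
  let rounds := meetings.filterMap pvGetRound
  decide (rounds ≠ PySem.List.sorted rounds (fun x => x) false)

-- ===== PRECONDITION & SPEC =====
def Spec_has_strict_round_reset_py (meetings : List (List (String × Option Int))) (out : Bool) : Prop := out = has_strict_round_reset_py_alt meetings
instance (meetings : List (List (String × Option Int))) (out : Bool) : Decidable (Spec_has_strict_round_reset_py meetings out) := by unfold Spec_has_strict_round_reset_py; infer_instance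

-- ===== CLAIM (what is proved, stated in full; the proofs are below) =====
def Claim_equal_has_strict_round_reset_py : Prop := ∀ (meetings : List (List (String × Option Int))), Dom_has_strict_round_reset_py meetings → Spec_has_strict_round_reset_py meetings (has_strict_round_reset_py meetings)

-- ===== LEMMAS AND PROOFS =====

-- the filtered-then-extracted list IS the filterMap list
lemma pv_filterMap_eq (meetings : List (List (String × Option Int))) :
    (meetings.filter (fun m => (pvGetRound m).isSome)).map (fun m => (pvGetRound m).getD 0)
      = meetings.filterMap pvGetRound := by
  induction meetings with
  | nil => rfl
  | cons m rest ih =>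
    cases h : pvGetRound m with
    | none => simpa [List.filter_cons, List.filterMap_cons, h] using ih
    | some r => simpa [List.filter_cons, List.filterMap_cons, h] using ih

-- A's loop, abstracted over the extracted round values
lemma pv_loop_chain (prev : Int) (ms : List (List (String × Option Int))) :
    pvALoop (some prev) ms
      = !decide (List.IsChain (· ≤ ·) (prev :: ms.map (fun m => (pvGetRound m).getD 0))) := by
  induction ms generalizing prev with
  | nil => simp [pvALoop]
  | cons m rest ih =>
    simp only [pvALoop, List.map_cons, List.isChain_cons_cons]
    by_cases h : (pvGetRound m).getD 0 < prev
    · simp [h, show ¬ prev ≤ (pvGetRound m).getD 0 by omega]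
    · simp [h, ih, show prev ≤ (pvGetRound m).getD 0 by omega]

lemma pv_loop_none (ms : List (List (String × Option Int))) :
    pvALoop none ms
      = !decide (List.IsChain (· ≤ ·) (ms.map (fun m => (pvGetRound m).getD 0))) := by
  cases ms with
  | nil => simp [pvALoop]
  | cons m rest => simpa [pvALoop] using pv_loop_chain ((pvGetRound m).getD 0) rest

-- a list of ints equals its sorted copy iff it is non-decreasing
lemma pv_sorted_eq_iff (rs : List Int) :
    rs = PySem.List.sorted rs (fun x => x) false ↔ List.IsChain (· ≤ ·) rs := by
  rw [List.isChain_iff_pairwise]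
  constructor
  · intro h
    have := PySem.List.sorted_pairwise rs (fun x => x) (κ := Int)
    rwa [← h] at this
  · intro h
    exact (PySem.List.sorted_eq_self_of_pairwise rs (fun x => x) h).symm

-- ===== VERDICT (by name: the statement is the Claim_ definition above) =====
theorem has_strict_round_reset_py_spec : Claim_equal_has_strict_round_reset_py := by
  intro meetings _
  unfold Spec_has_strict_round_reset_py has_strict_round_reset_py has_strict_round_reset_py_alt
  simp only [← pv_filterMap_eq]
  set numbered := meetings.filter (fun m => (pvGetRound m).isSome) with hn
  rw [pv_loop_none]
  by_cases hlen : numbered.length < 2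
  · -- short lists: both sides are false
    have hchain : List.IsChain (· ≤ ·) (numbered.map (fun m => (pvGetRound m).getD 0)) := by
      match numbered, hlen with
      | [], _ => exact List.isChain_nil
      | [m], _ => simp
    have hsor := (pv_sorted_eq_iff (numbered.map (fun m => (pvGetRound m).getD 0))).mpr hchain
    simp [hlen, ← hsor]
  · have hsor := pv_sorted_eq_iff (numbered.map (fun m => (pvGetRound m).getD 0))
    simp only [if_neg hlen, ne_eq, decide_not]
    congr 1
    exact decide_eq_decide.mpr hsor.symm
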